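-- pv_equiv track=rewrite | github.com/oliver-veal/cubr-addon | src/common/render.py | find_last_hash_block
-- ===== SOURCE A (Python) =====
-- def find_last_hash_block(s):
--     max_index = -1
--     max_length = 0
--     current_index = -1
--     current_length = 0
--     for i, c in enumerate(s):
--         if c == '#':
--             if current_index == -1:
--                 current_index = i
--             current_length += 1
--         else:
--             if current_length > max_length:
--                 max_length = current_length
--                 max_index = current_index
--             current_index = -1
--             current_length = 0
--     if current_length > max_length:
--         max_length = current_length
--         max_index = current_index
--     return (max_index, max_length)
-- ===== SOURCE B (Python) =====
-- def find_last_hash_block(s):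
--     # Phase 1: enumerate all maximal runs of '#' as (start, length) pairs.
--     n = len(s)
--     runs = []
--     i = 0
--     while i < n:
--         if s[i] == '#':
--             j = i
--             while j < n and s[j] == '#':
--                 j += 1
--             runs.append((i, j - i))
--             i = j
--         else:
--             i += 1
--     # Phase 2: select the first run of maximal length.
--     best = (-1, 0)
--     for start, length in runs:
--         if length > best[1]:
--             best = (start, length)
--     return best
-- ===== Notes on version B (the rewrite author's own statement) =====
-- stated objective: alternative
-- what changed: A tracks four pieces of mutable loop state (current/best run) in one fused scan with a post-loop flush; B first materialises the list of all maximal '#'-runs as (start, length) pairs and then selects the first longest run in a separate pass.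
import Mathlib
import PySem

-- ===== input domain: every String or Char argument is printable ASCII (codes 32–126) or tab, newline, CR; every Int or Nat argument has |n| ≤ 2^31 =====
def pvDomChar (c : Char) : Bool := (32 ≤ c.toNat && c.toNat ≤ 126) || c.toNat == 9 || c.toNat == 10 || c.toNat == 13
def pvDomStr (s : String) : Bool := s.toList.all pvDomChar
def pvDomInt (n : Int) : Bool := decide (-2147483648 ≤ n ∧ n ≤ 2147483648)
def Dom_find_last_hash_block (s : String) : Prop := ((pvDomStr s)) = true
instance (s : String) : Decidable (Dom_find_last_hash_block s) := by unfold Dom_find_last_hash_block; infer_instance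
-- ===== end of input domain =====

-- B replaces A's fused four-variable scan by a two-phase algorithm: materialise all maximal '#'-runs, then select the first longest (objective: alternative decomposition, same cost).

-- ===== PORT A =====
-- A's for-loop over enumerate(s) with state (max_index, max_length, current_index, current_length)
def fla_loop : List (Int × Char) → Int × Int × Int × Int → Int × Int × Int × Int
  | [], st => st
  | (i, c) :: rest, (mi, ml, ci, cl) =>
    if c = '#' then
      fla_loop rest (mi, ml, (if ci = -1 then i else ci), cl + 1)
    else
      if cl > ml then fla_loop rest (ci, cl, -1, 0)
      else fla_loop rest (mi, ml, -1, 0)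

-- A's trailing 'if current_length > max_length' + return
def fla_finish (st : Int × Int × Int × Int) : Int × Int :=
  if st.2.2.2 > st.2.1 then (st.2.2.1, st.2.2.2) else (st.1, st.2.1)

def find_last_hash_block (s : String) : Int × Int :=
  fla_finish (fla_loop (PySem.List.enumerate s.toList) (-1, 0, -1, 0))

-- ===== PORT B =====
-- inner while of Source B: length of the leading run of '#'
def flaCountRun : List Char → Nat
  | [] => 0
  | c :: r => if c = '#' then flaCountRun r + 1 else 0

-- outer while of Source B: the list of maximal '#'-runs as (start, length) pairs
def flaRuns : List Char → Int → List (Int × Int)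
  | [], _ => []
  | c :: rest, i =>
    if h : c = '#' then
      let k := flaCountRun (c :: rest)
      (i, (k : Int)) :: flaRuns (List.drop k (c :: rest)) (i + (k : Int))
    else
      flaRuns rest (i + 1)
termination_by cs _ => cs.length
decreasing_by
  · simp only [List.length_drop]
    have hcr : flaCountRun (c :: rest) = flaCountRun rest + 1 := by
      simp [flaCountRun, h]
    rw [hcr, List.length_cons]
    omega
  · simp

-- selection pass of Source B
def find_last_hash_block_alt (s : String) : Int × Int :=
  (flaRuns s.toList 0).foldl (fun b r => if r.2 > b.2 then r else b) (-1, 0)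

-- ===== PRECONDITION & SPEC =====
def Spec_find_last_hash_block (s : String) (out : Int × Int) : Prop := out = find_last_hash_block_alt s
instance (s : String) (out : Int × Int) : Decidable (Spec_find_last_hash_block s out) := by unfold Spec_find_last_hash_block; infer_instance

-- ===== CLAIM (what is proved, stated in full; the proofs are below) =====
def Claim_equal_find_last_hash_block : Prop := ∀ (s : String), Dom_find_last_hash_block s → Spec_find_last_hash_block s (find_last_hash_block s)

-- ===== LEMMAS AND PROOFS =====

lemma flaCountRun_cons_hash (rest : List Char) :
    flaCountRun ('#' :: rest) = flaCountRun rest + 1 := by simp [flaCountRun]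

lemma flaCountRun_cons_ne {c : Char} (h : ¬ c = '#') (rest : List Char) :
    flaCountRun (c :: rest) = 0 := by simp [flaCountRun, h]

-- the char right after the leading run, if any, is not '#'
lemma flaCountRun_next (l : List Char) (c' : Char) (tail : List Char)
    (h : List.drop (flaCountRun l) l = c' :: tail) : ¬ c' = '#' := by
  induction l generalizing c' tail with
  | nil => simp [flaCountRun] at h
  | cons c r ih =>
    by_cases hc : c = '#'
    · subst hc
      rw [flaCountRun_cons_hash] at h
      simp only [List.drop_succ_cons] at h
      exact ih _ _ h
    · rw [flaCountRun_cons_ne hc, List.drop_zero] at h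
      cases h; exact hc

-- running A's loop across a '#'-run (current_index already set): it just adds the run length
lemma run_lemma (cs : List Char) (i mi ml ci cl : Int) (hci : ¬ ci = -1) :
    fla_loop (PySem.List.enumerate cs i) (mi, ml, ci, cl)
      = fla_loop (PySem.List.enumerate (List.drop (flaCountRun cs) cs) (i + (flaCountRun cs : Int)))
          (mi, ml, ci, cl + (flaCountRun cs : Int)) := by
  induction cs generalizing i cl with
  | nil => simp [flaCountRun]
  | cons c rest ih =>
    by_cases hc : c = '#'
    · subst hc
      rw [flaCountRun_cons_hash]
      rw [PySem.List.enumerate_cons]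
      simp only [fla_loop, reduceIte, if_neg hci]
      rw [ih (i + 1) (cl + 1)]
      have h1 : i + 1 + (flaCountRun rest : Int) = i + ((flaCountRun rest : Int) + 1) := by ring
      have h2 : cl + 1 + (flaCountRun rest : Int) = cl + ((flaCountRun rest : Int) + 1) := by ring
      rw [h1, h2]
      push_cast
      simp
    · rw [flaCountRun_cons_ne hc, List.drop_zero]
      push_cast
      simp

-- main invariant: from a fresh-run state, finishing A's loop = folding B's selection over B's runs
lemma main_lemma : ∀ n (cs : List Char) (i mi ml : Int), cs.length = n → 0 ≤ ml → 0 ≤ i →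
    fla_finish (fla_loop (PySem.List.enumerate cs i) (mi, ml, -1, 0))
      = (flaRuns cs i).foldl (fun b r => if r.2 > b.2 then r else b) (mi, ml) := by
  intro n
  induction n using Nat.strong_induction_on with
  | _ n ih =>
    intro cs i mi ml hn hml hi
    match cs, hn with
    | [], hn =>
      simp [PySem.List.enumerate, fla_loop, fla_finish, flaRuns]
      omega
    | c :: rest, hn =>
      by_cases hc : c = '#'
      · subst hc
        rw [PySem.List.enumerate_cons]
        simp only [fla_loop, reduceIte, zero_add]
        have hci : ¬ (i : Int) = -1 := by omega
        rw [run_lemma rest (i + 1) mi ml i 1 hci]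
        have hkk : flaCountRun ('#' :: rest) = flaCountRun rest + 1 := flaCountRun_cons_hash rest
        set k := flaCountRun rest with hk
        have hrunseq : flaRuns ('#' :: rest) i
            = (i, ((k + 1 : Nat) : Int)) :: flaRuns (List.drop k rest) (i + ((k + 1 : Nat) : Int)) := by
          rw [flaRuns]
          simp only [hkk, List.drop_succ_cons, dite_true]
        rcases hdrop : List.drop k rest with _ | ⟨c', tail⟩
        · -- string ends inside the run
          rw [hrunseq, hdrop]
          simp only [flaRuns, List.foldl_cons, List.foldl_nil, PySem.List.enumerate_nil,
            fla_loop, fla_finish]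
          by_cases hb : ml < 1 + (k : Int)
          · rw [if_pos hb, if_pos (by push_cast; omega)]
            congr 1
            push_cast
            ring
          · rw [if_neg hb, if_neg (by push_cast; omega)]
        · -- run is followed by a non-'#' character c'
          have hc' : ¬ c' = '#' := flaCountRun_next rest c' tail hdrop
          rw [PySem.List.enumerate_cons]
          simp only [fla_loop, if_neg hc']
          have hklen : k ≤ rest.length := by
            by_contra hcon
            rw [List.drop_eq_nil_of_le (by omega)] at hdrop
            exact (List.cons_ne_nil _ _) hdrop.symm
          have htail : tail.length < n := by
            have hld := List.length_drop (l := rest) (i := k)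
            rw [hdrop] at hld
            simp at hld
            have hn' : rest.length + 1 = n := by simpa using hn
            omega
          have e1 : i + 1 + (k : Int) + 1 = i + ((k + 1 : Nat) : Int) + 1 := by push_cast; ring
          have hruns' : flaRuns (c' :: tail) (i + ((k + 1 : Nat) : Int))
              = flaRuns tail (i + ((k + 1 : Nat) : Int) + 1) := by
            rw [flaRuns]
            simp [hc']
          rw [hrunseq, hdrop, hruns', List.foldl_cons]
          by_cases hcmp : ml < 1 + (k : Int)
          · rw [if_pos hcmp, e1,
              ih tail.length htail tail _ i (1 + (k : Int)) rfl (by omega) (by push_cast; omega)]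
            rw [if_pos (show ((k + 1 : Nat) : Int) > ml by push_cast; omega)]
            congr 1
            push_cast
            ring
          · rw [if_neg hcmp, e1,
              ih tail.length htail tail _ mi ml rfl hml (by push_cast; omega)]
            rw [if_neg (show ¬ ((k + 1 : Nat) : Int) > ml by push_cast; omega)]
      · rw [PySem.List.enumerate_cons]
        simp only [fla_loop, if_neg hc]
        rw [if_neg (by omega)]
        have : rest.length < n := by simp at hn; omega
        rw [ih rest.length this rest (i + 1) mi ml rfl hml (by omega)]
        rw [flaRuns]
        simp [hc]

-- ===== VERDICT (by name: the statement is the Claim_ definition above) =====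
theorem find_last_hash_block_spec : Claim_equal_find_last_hash_block := by
  intro s _
  unfold Spec_find_last_hash_block find_last_hash_block find_last_hash_block_alt
  exact main_lemma s.toList.length s.toList 0 (-1) 0 rfl le_rfl le_rfl
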